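-- pv_equiv track=rewrite | github.com/classner/up | pose/store_pose_results.py | _get_num_tiles
-- ===== SOURCE A (Python) =====
-- def _get_num_tiles(length, max_size, rf):
--     """Get the number of tiles required to cover the entire image."""
--     if length <= max_size:
--         return 1
--     k = 0
--     while True:
--         new_size = (max_size - rf) * 2 + (max_size - 2*rf) * k
--         if new_size > length:
--             break
--         k += 1
--     return 2 + k
-- ===== SOURCE B (Python) =====
-- def _get_num_tiles(length, max_size, rf):
--     """Get the number of tiles required to cover the entire image.
--
--     Closed form: solves the linear inequality for the smallest k directly."""
--     if length <= max_size:
--         return 1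
--     base = (max_size - rf) * 2
--     if base > length:
--         return 2
--     step = max_size - 2 * rf
--     return 3 + (length - base) // step
-- ===== Notes on version B (the rewrite author's own statement) =====
-- stated objective: alternative
-- what changed: Replaces the incremental while-loop search for the smallest k with a closed-form floor division solving the linear inequality directly.
import Mathlib
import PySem

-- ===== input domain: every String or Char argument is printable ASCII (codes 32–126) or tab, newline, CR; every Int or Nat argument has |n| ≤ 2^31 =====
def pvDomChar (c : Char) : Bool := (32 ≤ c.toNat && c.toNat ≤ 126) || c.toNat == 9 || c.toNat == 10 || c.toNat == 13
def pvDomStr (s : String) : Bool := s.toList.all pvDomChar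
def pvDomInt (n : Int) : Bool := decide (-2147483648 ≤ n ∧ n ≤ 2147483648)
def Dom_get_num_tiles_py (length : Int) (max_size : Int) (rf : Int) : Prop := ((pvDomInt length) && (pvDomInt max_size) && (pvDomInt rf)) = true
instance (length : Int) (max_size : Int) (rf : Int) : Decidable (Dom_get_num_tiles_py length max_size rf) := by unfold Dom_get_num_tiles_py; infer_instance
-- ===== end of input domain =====

-- B replaces A's incremental while-loop search with a closed-form floor division (alternative O(1) formulation).


-- ===== PORT A =====
-- A's 'while True' loop, with fuel only to make the function total; inside
-- Pre_ the fuel is never exhausted (proved below).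
def get_num_tiles_py_loop (length : Int) (max_size : Int) (rf : Int) (k : Int) : Nat → Int
  | 0 => 2 + k
  | fuel + 1 =>
    let new_size := (max_size - rf) * 2 + (max_size - 2 * rf) * k
    if new_size > length then 2 + k
    else get_num_tiles_py_loop length max_size rf (k + 1) fuel

def get_num_tiles_py (length : Int) (max_size : Int) (rf : Int) : Int :=
  if length ≤ max_size then 1
  else get_num_tiles_py_loop length max_size rf 0
        ((length - (max_size - rf) * 2).toNat + 2)

-- ===== PORT B =====
def get_num_tiles_py_alt (length : Int) (max_size : Int) (rf : Int) : Int :=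
  if length ≤ max_size then 1
  else
    let base := (max_size - rf) * 2
    if base > length then 2
    else
      let step := max_size - 2 * rf
      3 + PySem.Int.floordiv (length - base) step

-- ===== PRECONDITION & SPEC =====
-- Pre_ excludes exactly the inputs on which A's while-loop never terminates
-- (length > max_size, first tile already too short, and a non-positive step).
def Pre_get_num_tiles_py (length : Int) (max_size : Int) (rf : Int) : Prop :=
  length ≤ max_size ∨ (max_size - rf) * 2 > length ∨ 0 < max_size - 2 * rf
instance (length : Int) (max_size : Int) (rf : Int) : Decidable (Pre_get_num_tiles_py length max_size rf) := by unfold Pre_get_num_tiles_py; infer_instance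

def pvWitness_get_num_tiles_py : Int × Int × Int := (10, 4, 1)

def Spec_get_num_tiles_py (length : Int) (max_size : Int) (rf : Int) (out : Int) : Prop := out = get_num_tiles_py_alt length max_size rf
instance (length : Int) (max_size : Int) (rf : Int) (out : Int) : Decidable (Spec_get_num_tiles_py length max_size rf out) := by unfold Spec_get_num_tiles_py; infer_instance

-- ===== CLAIM (what is proved, stated in full; the proofs are below) =====
def Claim_equal_get_num_tiles_py : Prop := ∀ (length : Int) (max_size : Int) (rf : Int), Dom_get_num_tiles_py length max_size rf → Pre_get_num_tiles_py length max_size rf → Spec_get_num_tiles_py length max_size rf (get_num_tiles_py length max_size rf)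

-- ===== LEMMAS AND PROOFS =====

-- With a positive step, the loop started at k ≤ q+1 (q the floor quotient)
-- returns 2 + (q + 1), as long as fuel covers the remaining iterations.
theorem get_num_tiles_py_loop_eq (length max_size rf : Int)
    (hs : 0 < max_size - 2 * rf) :
    ∀ (fuel : Nat) (k : Int),
      k ≤ PySem.Int.floordiv (length - (max_size - rf) * 2) (max_size - 2 * rf) + 1 →
      (PySem.Int.floordiv (length - (max_size - rf) * 2) (max_size - 2 * rf) + 1 - k).toNat < fuel →
      get_num_tiles_py_loop length max_size rf k fuel =
        2 + (PySem.Int.floordiv (length - (max_size - rf) * 2) (max_size - 2 * rf) + 1) := by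
  set s := max_size - 2 * rf with hsdef
  set b := (max_size - rf) * 2 with hbdef
  set q := PySem.Int.floordiv (length - b) s with hqdef
  have hq : q * s ≤ length - b ∧ length - b < (q + 1) * s :=
    (PySem.Int.floordiv_eq_iff_of_pos hs).mp hqdef.symm
  intro fuel
  induction fuel with
  | zero => intro k _ hf; omega
  | succ n ih =>
    intro k hk hf
    show (if b + s * k > length then 2 + k
          else get_num_tiles_py_loop length max_size rf (k + 1) n) = 2 + (q + 1)
    by_cases hbr : b + s * k > length
    · -- breaking: k must equal q + 1
      have : ¬ k ≤ q := by
        intro hle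
        have : s * k ≤ s * q := mul_le_mul_of_nonneg_left hle (le_of_lt hs)
        nlinarith [hq.1]
      simp only [if_pos hbr]
      omega
    · -- continuing: k ≤ q
      have hkq : k ≤ q := by
        by_contra h
        have h1 : q + 1 ≤ k := by omega
        have : s * (q + 1) ≤ s * k := mul_le_mul_of_nonneg_left h1 (le_of_lt hs)
        nlinarith [hq.2]
      simp only [if_neg hbr]
      exact ih (k + 1) (by omega) (by omega)

theorem get_num_tiles_py_spec : Claim_equal_get_num_tiles_py := by
  intro length max_size rf _ hpre
  unfold Spec_get_num_tiles_py get_num_tiles_py get_num_tiles_py_alt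
  by_cases hle : length ≤ max_size
  · simp [hle]
  · simp only [if_neg hle]
    by_cases hbig : (max_size - rf) * 2 > length
    · -- first iteration breaks immediately (k = 0)
      have hstep : get_num_tiles_py_loop length max_size rf 0
          ((length - (max_size - rf) * 2).toNat + 2) = 2 + 0 := by
        show (if (max_size - rf) * 2 + (max_size - 2 * rf) * 0 > length then 2 + (0:Int)
              else get_num_tiles_py_loop length max_size rf (0 + 1)
                    ((length - (max_size - rf) * 2).toNat + 1)) = 2 + 0
        rw [if_pos (by omega : (max_size - rf) * 2 + (max_size - 2 * rf) * 0 > length)]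
      rw [hstep, if_pos hbig]; norm_num
    · have hs : 0 < max_size - 2 * rf := by
        rcases hpre with h | h | h
        · exact absurd h hle
        · exact absurd h hbig
        · exact h
      set q := PySem.Int.floordiv (length - (max_size - rf) * 2) (max_size - 2 * rf) with hqdef
      have hq : q * (max_size - 2 * rf) ≤ length - (max_size - rf) * 2 ∧
          length - (max_size - rf) * 2 < (q + 1) * (max_size - 2 * rf) :=
        (PySem.Int.floordiv_eq_iff_of_pos hs).mp hqdef.symm
      have hq0 : 0 ≤ q := by
        by_contra h
        have h1 : q + 1 ≤ 0 := by omega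
        have : (q + 1) * (max_size - 2 * rf) ≤ 0 * (max_size - 2 * rf) :=
          mul_le_mul_of_nonneg_right h1 (le_of_lt hs)
        nlinarith [hq.2]
      have hqle : q ≤ length - (max_size - rf) * 2 := by nlinarith [hq.1]
      rw [get_num_tiles_py_loop_eq length max_size rf hs _ 0 (by omega) (by omega)]
      rw [if_neg hbig]
      omega

-- ===== VERDICT (by name: the statement is the Claim_ definition above) =====
-- (proved directly above as get_num_tiles_py_spec)
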